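-- pv_equiv track=rewrite | github.com/mufashe/finalProject | artifacts/alevel-view.py | _detect_year_and_subject
-- ===== SOURCE A (Python) =====
-- from typing import Any, Dict, List, Optional, Tuple
--
-- YEAR_TAGS = ("S4", "S5", "S6")
--
-- def _detect_year_and_subject(feat: str) -> Tuple[Optional[str], Optional[str]]:
--     f = feat.replace("-", "_").replace(" ", "_")
--     up = f.upper()
--     for y in YEAR_TAGS:
--         if up.startswith(y + "_"):
--             subj = f[len(y) + 1:]
--             return y, subj
--     for y in YEAR_TAGS:
--         if up.endswith("_" + y):
--             subj = f[:-(len(y) + 1)]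
--             return y, subj
--     return None, None
-- ===== SOURCE B (Python) =====
-- YEAR_TAGS = ("S4", "S5", "S6")
--
-- def _detect_year_and_subject(feat):
--     f = feat.replace("-", "_").replace(" ", "_")
--     parts = f.split("_")
--     if len(parts) > 1:
--         head = parts[0].upper()
--         if head in YEAR_TAGS:
--             return head, "_".join(parts[1:])
--         tail = parts[-1].upper()
--         if tail in YEAR_TAGS:
--             return tail, "_".join(parts[:-1])
--     return None, None
-- ===== Notes on version B (the rewrite author's own statement) =====
-- stated objective: idiomatic
-- what changed: Replaces the two startswith/endswith scans with length-based slicing by a single split on the underscore separator plus membership tests of the first/last part in YEAR_TAGS, rebuilding the subject with a join.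
import Mathlib
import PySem

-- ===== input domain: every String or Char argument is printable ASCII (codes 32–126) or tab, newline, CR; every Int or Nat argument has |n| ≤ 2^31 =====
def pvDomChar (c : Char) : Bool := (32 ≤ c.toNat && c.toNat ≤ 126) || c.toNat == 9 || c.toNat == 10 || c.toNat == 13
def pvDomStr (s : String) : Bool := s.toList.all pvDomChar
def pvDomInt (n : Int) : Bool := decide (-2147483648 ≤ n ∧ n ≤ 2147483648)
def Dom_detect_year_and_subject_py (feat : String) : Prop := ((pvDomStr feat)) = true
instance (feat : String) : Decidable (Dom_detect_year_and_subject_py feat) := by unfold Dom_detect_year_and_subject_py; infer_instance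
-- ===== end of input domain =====

-- B replaces A's two tag-scans with slicing by a single split on the underscore separator plus first/last-part membership tests (idiomatic; same cost).

-- ===== PORT A =====
-- 'for y in YEAR_TAGS: if up.startswith(y + "_"): return y, f[len(y)+1:]'
def pvPrefLoop (up f : List Char) : List (List Char) → Option (Option String × Option String)
  | [] => none
  | y :: ys =>
    if PySem.Chars.startswith up (y ++ ['_'])
    then some (some (String.ofList y), some (String.ofList (PySem.Chars.slice f (some ((y.length : Int) + 1)) none)))
    else pvPrefLoop up f ys

-- 'for y in YEAR_TAGS: if up.endswith("_" + y): return y, f[:-(len(y)+1)]'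
def pvSufLoop (up f : List Char) : List (List Char) → Option (Option String × Option String)
  | [] => none
  | y :: ys =>
    if PySem.Chars.endswith up ('_' :: y)
    then some (some (String.ofList y), some (String.ofList (PySem.Chars.slice f none (some (-((y.length : Int) + 1))))))
    else pvSufLoop up f ys

def detect_year_and_subject_py (feat : String) : Option String × Option String :=
  let f := PySem.Chars.replace (PySem.Chars.replace feat.toList ['-'] ['_']) [' '] ['_']
  let up := PySem.Chars.upper f
  match pvPrefLoop up f [['S','4'], ['S','5'], ['S','6']] with
  | some r => r
  | none =>
    match pvSufLoop up f [['S','4'], ['S','5'], ['S','6']] with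
    | some r => r
    | none => (none, none)

-- ===== PORT B =====
def detect_year_and_subject_py_alt (feat : String) : Option String × Option String :=
  let f := PySem.Chars.replace (PySem.Chars.replace feat.toList ['-'] ['_']) [' '] ['_']
  let parts := PySem.Chars.splitOn f ['_']
  if 1 < parts.length then
    let head := PySem.Chars.upper (parts.headD [])
    if head = ['S','4'] ∨ head = ['S','5'] ∨ head = ['S','6'] then
      (some (String.ofList head), some (String.ofList (PySem.Chars.join ['_'] parts.tail)))
    else
      let tl := PySem.Chars.upper (parts.getLastD [])
      if tl = ['S','4'] ∨ tl = ['S','5'] ∨ tl = ['S','6'] then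
        (some (String.ofList tl), some (String.ofList (PySem.Chars.join ['_'] parts.dropLast)))
      else (none, none)
  else (none, none)

-- ===== PRECONDITION & SPEC =====
def Spec_detect_year_and_subject_py (feat : String) (out : Option String × Option String) : Prop := out = detect_year_and_subject_py_alt feat
instance (feat : String) (out : Option String × Option String) : Decidable (Spec_detect_year_and_subject_py feat out) := by unfold Spec_detect_year_and_subject_py; infer_instance

-- ===== CLAIM (what is proved, stated in full; the proofs are below) =====
def Claim_equal_detect_year_and_subject_py : Prop := ∀ (feat : String), Dom_detect_year_and_subject_py feat → Spec_detect_year_and_subject_py feat (detect_year_and_subject_py feat)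

-- ===== LEMMAS AND PROOFS =====

-- simple structural model of Python's split on the single underscore separator
def pvConsH (x : List Char) : List (List Char) → List (List Char)
  | [] => [x]
  | p :: ps => (x ++ p) :: ps

def pysplit : List Char → List (List Char)
  | [] => [[]]
  | c :: rest => if c = '_' then [] :: pysplit rest else pvConsH [c] (pysplit rest)

theorem pysplit_ne_nil (l : List Char) : pysplit l ≠ [] := by
  cases l with
  | nil => simp [pysplit]
  | cons c rest =>
    simp only [pysplit]
    split
    · simp
    · cases h : pysplit rest <;> simp [pvConsH]

theorem pysplit_shape (l : List Char) : ∃ p ps, pysplit l = p :: ps := by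
  cases h : pysplit l with
  | nil => exact absurd h (pysplit_ne_nil l)
  | cons p ps => exact ⟨p, ps, rfl⟩

theorem pvConsH_nil_of_ne (ps : List (List Char)) (h : ps ≠ []) : pvConsH [] ps = ps := by
  cases ps with
  | nil => exact absurd rfl h
  | cons p ps => simp [pvConsH]

theorem pvConsH_consH (x : List Char) (c : Char) (ps : List (List Char)) :
    pvConsH x (pvConsH [c] ps) = pvConsH (x ++ [c]) ps := by
  cases ps <;> simp [pvConsH]

theorem splitOn_go_eq (fuel : Nat) (l cur : List Char) (acc : List (List Char))
    (h : l.length ≤ fuel) :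
    PySem.Chars.splitOn.go ['_'] fuel l cur acc = acc.reverse ++ pvConsH cur.reverse (pysplit l) := by
  induction fuel generalizing l cur acc with
  | zero =>
    have : l = [] := by cases l <;> simp_all
    subst this
    simp [PySem.Chars.splitOn.go, pysplit, pvConsH]
  | succ fuel ih =>
    cases l with
    | nil => simp [PySem.Chars.splitOn.go, pysplit, pvConsH]
    | cons c rest =>
      by_cases hc : c = '_'
      · subst hc
        have hpre : List.isPrefixOf ['_'] ('_' :: rest) = true := by
          simp [List.isPrefixOf]
        rw [PySem.Chars.splitOn.go]
        simp only [hpre, if_true, List.length_cons, List.length_nil, Nat.zero_add,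
          List.drop_succ_cons, List.drop_zero]
        rw [ih rest [] (cur.reverse :: acc) (by simpa using Nat.le_of_succ_le_succ h)]
        obtain ⟨p, ps, hps⟩ := pysplit_shape rest
        simp [pysplit, hps, pvConsH]
      · have hpre : List.isPrefixOf ['_'] (c :: rest) = false := by
          simp [List.isPrefixOf]
          intro h'; exact hc h'.symm
        rw [PySem.Chars.splitOn.go]
        simp only [hpre, Bool.false_eq_true, if_false]
        rw [ih rest (c :: cur) acc (by simpa using Nat.le_of_succ_le_succ h)]
        simp [pysplit, hc, pvConsH_consH]

theorem splitOn_eq (l : List Char) : PySem.Chars.splitOn l ['_'] = pysplit l := by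
  rw [PySem.Chars.splitOn, splitOn_go_eq (l.length + 1) l [] [] (by omega)]
  simp [pvConsH_nil_of_ne _ (pysplit_ne_nil l)]

theorem intercalate_cons2 (x y : List Char) (ys : List (List Char)) :
    List.intercalate ['_'] (x :: y :: ys) = x ++ '_' :: List.intercalate ['_'] (y :: ys) := by
  simp [List.intercalate, List.intersperse]

theorem intercalate_cons_ne (x : List Char) (ps : List (List Char)) (h : ps ≠ []) :
    List.intercalate ['_'] (x :: ps) = x ++ '_' :: List.intercalate ['_'] ps := by
  cases ps with
  | nil => exact absurd rfl h
  | cons q qs => exact intercalate_cons2 x q qs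

theorem intercalate_pysplit (l : List Char) : List.intercalate ['_'] (pysplit l) = l := by
  induction l with
  | nil => simp [pysplit, List.intercalate]
  | cons c rest ih =>
    obtain ⟨p, ps, hps⟩ := pysplit_shape rest
    by_cases hc : c = '_'
    · subst hc
      simp only [pysplit, if_true]
      rw [hps] at ih ⊢
      rw [intercalate_cons2, ih]
      simp
    · simp only [pysplit, hc, if_false]
      rw [hps] at ih ⊢
      cases ps with
      | nil => simp_all [pvConsH, List.intercalate]
      | cons q qs =>
        simp only [pvConsH]
        rw [intercalate_cons2] at ih ⊢
        simp [← ih]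

theorem pysplit_append (a b : List Char) :
    pysplit (a ++ '_' :: b) = pysplit a ++ pysplit b := by
  induction a with
  | nil => simp [pysplit]
  | cons c a ih =>
    by_cases hc : c = '_'
    · subst hc; simp [pysplit, ih]
    · simp only [List.cons_append, pysplit, hc, if_false, ih]
      obtain ⟨p, ps, hps⟩ := pysplit_shape a
      rw [hps]
      simp [pvConsH]

theorem upperChar_underscore : PySem.Chars.upperChar '_' = '_' := by decide

theorem upperChar_eq_underscore {c : Char} (h : PySem.Chars.upperChar c = '_') : c = '_' := by
  by_cases hl : PySem.Chars.islower c = true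
  · exfalso
    have hb : 97 ≤ c.toNat ∧ c.toNat ≤ 122 := by
      simp only [PySem.Chars.islower, Bool.and_eq_true, decide_eq_true_eq] at hl
      exact ⟨hl.1, hl.2⟩
    rw [PySem.Chars.upperChar, if_pos hl] at h
    have h95 : (Char.ofNat (c.toNat - 32)).toNat = 95 := by rw [h]; rfl
    rw [Char.toNat_ofNat, if_pos (Or.inl (by omega))] at h95
    omega
  · rwa [PySem.Chars.upperChar, if_neg hl] at h

theorem ne_underscore_of_upper {c d : Char} (h : PySem.Chars.upperChar c = d) (hd : d ≠ '_') :
    c ≠ '_' := by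
  intro hc; subst hc
  rw [upperChar_underscore] at h
  exact hd h.symm

-- decomposition of l around the FIRST separator when the split has more than one piece
theorem split_decomp (l : List Char) (h : 1 < (pysplit l).length) :
    l = (pysplit l).headD [] ++ '_' :: List.intercalate ['_'] (pysplit l).tail := by
  obtain ⟨p, ps, hps⟩ := pysplit_shape l
  cases ps with
  | nil => rw [hps] at h; simp at h
  | cons q qs =>
    conv_lhs => rw [← intercalate_pysplit l]
    rw [hps, intercalate_cons2]
    simp

theorem intercalate_append_singleton (ps : List (List Char)) (x : List Char) (h : ps ≠ []) :
    List.intercalate ['_'] (ps ++ [x]) = List.intercalate ['_'] ps ++ '_' :: x := by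
  induction ps with
  | nil => exact absurd rfl h
  | cons p ps ih =>
    cases ps with
    | nil => simp [List.intercalate]
    | cons q qs =>
      rw [List.cons_append, intercalate_cons_ne p _ (by simp), ih (by simp),
        intercalate_cons_ne p _ (by simp)]
      simp

-- decomposition of l around the LAST separator when the split has more than one piece
theorem suf_decomp (l : List Char) (h : 1 < (pysplit l).length) :
    l = List.intercalate ['_'] (pysplit l).dropLast ++ '_' :: (pysplit l).getLastD [] := by
  obtain ⟨p, ps, hps⟩ := pysplit_shape l
  cases ps with
  | nil => rw [hps] at h; simp at h
  | cons q qs =>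
    obtain ⟨init, x, hix, hine⟩ : ∃ init x, p :: q :: qs = init ++ [x] ∧ init ≠ [] := by
      refine ⟨(p :: q :: qs).dropLast, (p :: q :: qs).getLast (by simp), ?_, by simp⟩
      exact (List.dropLast_concat_getLast (by simp)).symm
    conv_lhs => rw [← intercalate_pysplit l]
    rw [hps, hix, intercalate_append_singleton _ _ hine]
    simp

theorem pysplit_pair (d e : Char) (hd : d ≠ '_') (he : e ≠ '_') :
    pysplit [d, e] = [[d, e]] := by
  simp [pysplit, hd, he, pvConsH]

theorem upper_headD_len (l : List Char) (y1 y2 : Char)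
    (h : PySem.Chars.upper ((pysplit l).headD []) = [y1, y2]) :
    ((pysplit l).headD []).length = 2 := by
  have := congrArg List.length h
  simpa [PySem.Chars.upper] using this

-- the prefix test of A matches the head test of B (per tag [y1, y2])
theorem pref_iff (l : List Char) (y1 y2 : Char) (h1 : y1 ≠ '_') (h2 : y2 ≠ '_') :
    ([y1, y2, '_'] <+: PySem.Chars.upper l) ↔
      (1 < (pysplit l).length ∧ PySem.Chars.upper ((pysplit l).headD []) = [y1, y2]) := by
  constructor
  · rintro ⟨t, ht⟩
    have ht' : List.map PySem.Chars.upperChar l = y1 :: y2 :: '_' :: t := by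
      simpa [PySem.Chars.upper] using ht.symm
    rw [List.map_eq_cons_iff] at ht'
    obtain ⟨c1, l1, rfl, e1, ht'⟩ := ht'
    rw [List.map_eq_cons_iff] at ht'
    obtain ⟨c2, l2, rfl, e2, ht'⟩ := ht'
    rw [List.map_eq_cons_iff] at ht'
    obtain ⟨c3, rest, rfl, e3, -⟩ := ht'
    have hc3 : c3 = '_' := upperChar_eq_underscore e3
    have hc1 : c1 ≠ '_' := ne_underscore_of_upper e1 h1
    have hc2 : c2 ≠ '_' := ne_underscore_of_upper e2 h2
    subst hc3
    obtain ⟨p, ps, hps⟩ := pysplit_shape rest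
    have hsp : pysplit (c1 :: c2 :: '_' :: rest) = (c1 :: c2 :: []) :: pysplit rest := by
      simp only [pysplit, hc1, hc2, if_false, if_true]
      rw [hps]
      simp [pvConsH]
    rw [hsp]
    refine ⟨by rw [hps]; simp, ?_⟩
    simp [PySem.Chars.upper, e1, e2]
  · rintro ⟨hlen, hhead⟩
    have hd := split_decomp l hlen
    refine ⟨List.map PySem.Chars.upperChar (List.intercalate ['_'] (pysplit l).tail), ?_⟩
    have hlen2 := upper_headD_len l y1 y2 hhead
    conv_rhs => rw [hd]
    match h : (pysplit l).headD [], hlen2 with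
    | [c1, c2], _ =>
      rw [h] at hhead
      simp only [PySem.Chars.upper, List.map_cons, List.map_nil, List.cons.injEq, and_true] at hhead
      obtain ⟨e1, e2⟩ := hhead
      subst e1; subst e2
      simp [PySem.Chars.upper, upperChar_underscore]

theorem upper_getLastD_len (l : List Char) (y1 y2 : Char)
    (h : PySem.Chars.upper ((pysplit l).getLastD []) = [y1, y2]) :
    ((pysplit l).getLastD []).length = 2 := by
  have := congrArg List.length h
  simpa [PySem.Chars.upper] using this

-- the suffix test of A matches the last-part test of B (per tag [y1, y2])
theorem suf_iff (l : List Char) (y1 y2 : Char) (h1 : y1 ≠ '_') (h2 : y2 ≠ '_') :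
    (['_', y1, y2] <:+ PySem.Chars.upper l) ↔
      (1 < (pysplit l).length ∧ PySem.Chars.upper ((pysplit l).getLastD []) = [y1, y2]) := by
  constructor
  · rintro ⟨t, ht⟩
    have ht' : List.map PySem.Chars.upperChar l = t ++ ['_', y1, y2] := by
      simpa [PySem.Chars.upper] using ht.symm
    rw [List.map_eq_append_iff] at ht'
    obtain ⟨l1, l2, rfl, -, ht2⟩ := ht'
    rw [List.map_eq_cons_iff] at ht2
    obtain ⟨c3, l2, rfl, e3, ht2⟩ := ht2
    rw [List.map_eq_cons_iff] at ht2
    obtain ⟨d, l2, rfl, ed, ht2⟩ := ht2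
    rw [List.map_eq_cons_iff] at ht2
    obtain ⟨e, l2, rfl, ee, ht2⟩ := ht2
    have hl2 : l2 = [] := by simpa using ht2
    subst hl2
    have hc3 : c3 = '_' := upperChar_eq_underscore e3
    have hd : d ≠ '_' := ne_underscore_of_upper ed h1
    have he : e ≠ '_' := ne_underscore_of_upper ee h2
    subst hc3
    have hsp : pysplit (l1 ++ '_' :: [d, e]) = pysplit l1 ++ [[d, e]] := by
      rw [pysplit_append, pysplit_pair d e hd he]
    rw [hsp]
    obtain ⟨p, ps, hps⟩ := pysplit_shape l1
    constructor
    · rw [hps]; simp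
    · simp [PySem.Chars.upper, ed, ee]
  · rintro ⟨hlen, hlast⟩
    have hd := suf_decomp l hlen
    refine ⟨List.map PySem.Chars.upperChar (List.intercalate ['_'] (pysplit l).dropLast), ?_⟩
    have hlen2 := upper_getLastD_len l y1 y2 hlast
    conv_rhs => rw [hd]
    match h : (pysplit l).getLastD [], hlen2 with
    | [c1, c2], _ =>
      rw [h] at hlast
      simp only [PySem.Chars.upper, List.map_cons, List.map_nil, List.cons.injEq, and_true] at hlast
      obtain ⟨e1, e2⟩ := hlast
      subst e1; subst e2
      simp [PySem.Chars.upper, upperChar_underscore]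

-- A's prefix-branch subject  f[3:]  equals B's joined parts[1:]
theorem pref_subj (l : List Char) (hlen : 1 < (pysplit l).length)
    (hlen2 : ((pysplit l).headD []).length = 2) :
    PySem.List.slice l (some 3) none = List.intercalate ['_'] (pysplit l).tail := by
  have hd := split_decomp l hlen
  have : PySem.List.slice l (some 3) none = l.drop 3 := by
    rw [PySem.List.slice_from _ (by norm_num)]
    rfl
  rw [this]
  conv_lhs => rw [hd]
  have hsplit : (pysplit l).headD [] ++ '_' :: List.intercalate ['_'] (pysplit l).tail
      = ((pysplit l).headD [] ++ ['_']) ++ List.intercalate ['_'] (pysplit l).tail := by simp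
  rw [hsplit, List.drop_left' (by rw [List.length_append, hlen2]; rfl)]

-- A's suffix-branch subject  f[:-3]  equals B's joined parts[:-1]
theorem suf_subj (l : List Char) (hlen : 1 < (pysplit l).length)
    (hlen2 : ((pysplit l).getLastD []).length = 2) :
    PySem.List.slice l none (some (-3)) = List.intercalate ['_'] (pysplit l).dropLast := by
  have hd := suf_decomp l hlen
  have hsl : PySem.List.slice l none (some (-3)) = l.take (l.length - 3) := by
    exact PySem.List.slice_to_neg_ofNat l 3 (by norm_num)
  rw [hsl]
  generalize hI : List.intercalate ['_'] (pysplit l).dropLast = I at hd ⊢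
  generalize hG : (pysplit l).getLastD [] = G at hd hlen2
  have hn : (I ++ '_' :: G).length - 3 = I.length := by
    simp [hlen2]
  rw [hd, hn]
  exact List.take_left' rfl

-- boolean forms of the two matching tests, as they appear in the ports
theorem startswith_tag_true (l : List Char) (y1 y2 : Char)
    (h : 1 < (pysplit l).length ∧ PySem.Chars.upper ((pysplit l).headD []) = [y1, y2])
    (h1 : y1 ≠ '_') (h2 : y2 ≠ '_') :
    PySem.Chars.startswith (PySem.Chars.upper l) [y1, y2, '_'] = true :=
  (PySem.Chars.startswith_iff _ _).2 ((pref_iff l y1 y2 h1 h2).2 h)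

theorem startswith_tag_false (l : List Char) (y1 y2 : Char)
    (h : ¬(1 < (pysplit l).length ∧ PySem.Chars.upper ((pysplit l).headD []) = [y1, y2]))
    (h1 : y1 ≠ '_') (h2 : y2 ≠ '_') :
    PySem.Chars.startswith (PySem.Chars.upper l) [y1, y2, '_'] = false := by
  rw [Bool.eq_false_iff]
  intro hp
  exact h ((pref_iff l y1 y2 h1 h2).1 ((PySem.Chars.startswith_iff _ _).1 hp))

theorem endswith_tag_true (l : List Char) (y1 y2 : Char)
    (h : 1 < (pysplit l).length ∧ PySem.Chars.upper ((pysplit l).getLastD []) = [y1, y2])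
    (h1 : y1 ≠ '_') (h2 : y2 ≠ '_') :
    PySem.Chars.endswith (PySem.Chars.upper l) ['_', y1, y2] = true :=
  (PySem.Chars.endswith_iff _ _).2 ((suf_iff l y1 y2 h1 h2).2 h)

theorem endswith_tag_false (l : List Char) (y1 y2 : Char)
    (h : ¬(1 < (pysplit l).length ∧ PySem.Chars.upper ((pysplit l).getLastD []) = [y1, y2]))
    (h1 : y1 ≠ '_') (h2 : y2 ≠ '_') :
    PySem.Chars.endswith (PySem.Chars.upper l) ['_', y1, y2] = false := by
  rw [Bool.eq_false_iff]
  intro hp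
  exact h ((suf_iff l y1 y2 h1 h2).1 ((PySem.Chars.endswith_iff _ _).1 hp))

-- ===== VERDICT (by name: the statement is the Claim_ definition above) =====
theorem detect_year_and_subject_py_spec : Claim_equal_detect_year_and_subject_py := by
  intro feat _
  unfold Spec_detect_year_and_subject_py detect_year_and_subject_py detect_year_and_subject_py_alt
  simp only [splitOn_eq]
  generalize (PySem.Chars.replace (PySem.Chars.replace feat.toList ['-'] ['_']) [' '] ['_']) = l
  simp only [pvPrefLoop, pvSufLoop]
  by_cases hlen : 1 < (pysplit l).length
  · by_cases h4 : PySem.Chars.upper ((pysplit l).headD []) = ['S', '4']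
    · have p4 := startswith_tag_true l 'S' '4' ⟨hlen, h4⟩ (by decide) (by decide)
      have hsub := pref_subj l hlen (upper_headD_len l 'S' '4' h4)
      rw [if_pos hlen, if_pos (Or.inl h4), h4]
      simp [p4, PySem.Chars.join, hsub]
    · by_cases h5 : PySem.Chars.upper ((pysplit l).headD []) = ['S', '5']
      · have s4 := startswith_tag_false l 'S' '4' (fun h => h4 h.2) (by decide) (by decide)
        have p5 := startswith_tag_true l 'S' '5' ⟨hlen, h5⟩ (by decide) (by decide)
        have hsub := pref_subj l hlen (upper_headD_len l 'S' '5' h5)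
        rw [if_pos hlen, if_pos (Or.inr (Or.inl h5)), h5]
        simp [s4, p5, PySem.Chars.join, hsub]
      · by_cases h6 : PySem.Chars.upper ((pysplit l).headD []) = ['S', '6']
        · have s4 := startswith_tag_false l 'S' '4' (fun h => h4 h.2) (by decide) (by decide)
          have s5 := startswith_tag_false l 'S' '5' (fun h => h5 h.2) (by decide) (by decide)
          have p6 := startswith_tag_true l 'S' '6' ⟨hlen, h6⟩ (by decide) (by decide)
          have hsub := pref_subj l hlen (upper_headD_len l 'S' '6' h6)
          rw [if_pos hlen, if_pos (Or.inr (Or.inr h6)), h6]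
          simp [s4, s5, p6, PySem.Chars.join, hsub]
        · have s4 := startswith_tag_false l 'S' '4' (fun h => h4 h.2) (by decide) (by decide)
          have s5 := startswith_tag_false l 'S' '5' (fun h => h5 h.2) (by decide) (by decide)
          have s6 := startswith_tag_false l 'S' '6' (fun h => h6 h.2) (by decide) (by decide)
          have hno : ¬(PySem.Chars.upper ((pysplit l).headD []) = ['S', '4'] ∨
              PySem.Chars.upper ((pysplit l).headD []) = ['S', '5'] ∨
              PySem.Chars.upper ((pysplit l).headD []) = ['S', '6']) := by
            rintro (h | h | h)
            exacts [h4 h, h5 h, h6 h]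
          rw [if_pos hlen, if_neg hno]
          by_cases g4 : PySem.Chars.upper ((pysplit l).getLastD []) = ['S', '4']
          · have e4 := endswith_tag_true l 'S' '4' ⟨hlen, g4⟩ (by decide) (by decide)
            have hsub := suf_subj l hlen (upper_getLastD_len l 'S' '4' g4)
            rw [if_pos (Or.inl g4), g4]
            simp [s4, s5, s6, e4, PySem.Chars.join, hsub]
          · by_cases g5 : PySem.Chars.upper ((pysplit l).getLastD []) = ['S', '5']
            · have f4 := endswith_tag_false l 'S' '4' (fun h => g4 h.2) (by decide) (by decide)
              have e5 := endswith_tag_true l 'S' '5' ⟨hlen, g5⟩ (by decide) (by decide)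
              have hsub := suf_subj l hlen (upper_getLastD_len l 'S' '5' g5)
              rw [if_pos (Or.inr (Or.inl g5)), g5]
              simp [s4, s5, s6, f4, e5, PySem.Chars.join, hsub]
            · by_cases g6 : PySem.Chars.upper ((pysplit l).getLastD []) = ['S', '6']
              · have f4 := endswith_tag_false l 'S' '4' (fun h => g4 h.2) (by decide) (by decide)
                have f5 := endswith_tag_false l 'S' '5' (fun h => g5 h.2) (by decide) (by decide)
                have e6 := endswith_tag_true l 'S' '6' ⟨hlen, g6⟩ (by decide) (by decide)
                have hsub := suf_subj l hlen (upper_getLastD_len l 'S' '6' g6)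
                rw [if_pos (Or.inr (Or.inr g6)), g6]
                simp [s4, s5, s6, f4, f5, e6, PySem.Chars.join, hsub]
              · have f4 := endswith_tag_false l 'S' '4' (fun h => g4 h.2) (by decide) (by decide)
                have f5 := endswith_tag_false l 'S' '5' (fun h => g5 h.2) (by decide) (by decide)
                have f6 := endswith_tag_false l 'S' '6' (fun h => g6 h.2) (by decide) (by decide)
                have gno : ¬(PySem.Chars.upper ((pysplit l).getLastD []) = ['S', '4'] ∨
                  PySem.Chars.upper ((pysplit l).getLastD []) = ['S', '5'] ∨
                  PySem.Chars.upper ((pysplit l).getLastD []) = ['S', '6']) := by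
                  rintro (h | h | h)
                  exacts [g4 h, g5 h, g6 h]
                rw [if_neg gno]
                simp [s4, s5, s6, f4, f5, f6]
  · have s4 := startswith_tag_false l 'S' '4' (fun h => hlen h.1) (by decide) (by decide)
    have s5 := startswith_tag_false l 'S' '5' (fun h => hlen h.1) (by decide) (by decide)
    have s6 := startswith_tag_false l 'S' '6' (fun h => hlen h.1) (by decide) (by decide)
    have f4 := endswith_tag_false l 'S' '4' (fun h => hlen h.1) (by decide) (by decide)
    have f5 := endswith_tag_false l 'S' '5' (fun h => hlen h.1) (by decide) (by decide)
    have f6 := endswith_tag_false l 'S' '6' (fun h => hlen h.1) (by decide) (by decide)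
    rw [if_neg hlen]
    simp [s4, s5, s6, f4, f5, f6]
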